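-- pv_equiv track=rewrite | github.com/alissoncs/obrai-blackops-products | votoran-import/scraper_votoran_produtos.py | merge_products
-- ===== SOURCE A (Python) =====
-- from typing import Any
--
-- def merge_products(existing: list[dict[str, Any]], new: list[dict[str, Any]]) -> list[dict[str, Any]]:
--     by_slug: dict[str, dict[str, Any]] = {}
--     order: list[str] = []
--     for p in existing:
--         s = (p.get("slug") or "").strip().lower()
--         if not s:
--             continue
--         by_slug[s] = p
--         order.append(s)
--     for p in new:
--         s = (p.get("slug") or "").strip().lower()
--         if not s:
--             continue
--         by_slug[s] = p
--         if s not in order: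
--             order.append(s)
--     return [by_slug[s] for s in order if s in by_slug]
-- ===== SOURCE B (Python) =====
-- def merge_products(existing, new):
--     def norm(p):
--         return (p.get("slug") or "").strip().lower()
--
--     combined = existing + new
--
--     def resolve(s):
--         # the last product (existing first, then new) carrying slug s wins;
--         # always finds one, since s comes from a product in combined
--         for p in reversed(combined):
--             if norm(p) == s:
--                 return p
--
--     out = [resolve(norm(p)) for p in existing if norm(p)]
--     seen = {norm(p) for p in existing if norm(p)}
--     for p in new:
--         s = norm(p)
--         if s and s not in seen:
--             out.append(resolve(s))
--             seen.add(s)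
--     return out
-- ===== Notes on version B (the rewrite author's own statement) =====
-- stated objective: alternative
-- what changed: A builds a slug->product dict (last write wins) alongside an order list and emits by dict lookup; B builds no dict at all: it determines the winning product for each emitted slug by a direct reverse-order search of existing+new, emitting existing slots first (repeats kept) and then first-seen new-only slugs.
import Mathlib
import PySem

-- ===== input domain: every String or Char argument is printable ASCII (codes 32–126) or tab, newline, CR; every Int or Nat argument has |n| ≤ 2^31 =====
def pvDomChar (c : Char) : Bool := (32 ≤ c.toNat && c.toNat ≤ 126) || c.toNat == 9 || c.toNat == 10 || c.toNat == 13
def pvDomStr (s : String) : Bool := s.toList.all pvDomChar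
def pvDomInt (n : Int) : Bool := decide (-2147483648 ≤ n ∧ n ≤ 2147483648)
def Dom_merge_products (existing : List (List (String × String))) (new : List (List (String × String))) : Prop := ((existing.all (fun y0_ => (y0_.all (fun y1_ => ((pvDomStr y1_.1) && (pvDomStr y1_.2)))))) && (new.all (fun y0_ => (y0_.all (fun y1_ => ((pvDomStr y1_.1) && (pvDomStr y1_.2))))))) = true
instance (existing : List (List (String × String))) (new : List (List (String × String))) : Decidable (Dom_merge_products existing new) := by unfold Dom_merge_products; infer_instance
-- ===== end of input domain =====

-- B builds no dict: the winning product per slug is found by a direct reverse-order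
-- search of existing+new at emission time; same return value, objective: alternative
-- (a dict-free algorithm of higher asymptotic cost; no speed claim).

-- (p.get("slug") or "").strip().lower() — shared normalisation both Pythons perform.
def pvNorm (p : List (String × String)) : String :=
  PySem.Str.lower (PySem.Str.strip ((PySem.Dict.mk p).getD "slug" ""))

-- ===== PORT A =====
def merge_products (existing : List (List (String × String))) (new : List (List (String × String))) : List (List (String × String)) :=
  -- first loop: for p in existing
  let st1 := existing.foldl
    (fun (st : PySem.Dict String (List (String × String)) × List String) p =>
      let s := pvNorm p
      if s = "" then st
      else (st.1.insert s p, st.2 ++ [s]))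
    (PySem.Dict.empty, [])
  -- second loop: for p in new
  let st2 := new.foldl
    (fun (st : PySem.Dict String (List (String × String)) × List String) p =>
      let s := pvNorm p
      if s = "" then st
      else (st.1.insert s p, if s ∈ st.2 then st.2 else st.2 ++ [s]))
    st1
  -- [by_slug[s] for s in order if s in by_slug]
  st2.2.filterMap (fun s => st2.1.get? s)

-- ===== PORT B =====
-- resolve(s): scan reversed(combined) for the first product whose slug is s.
-- Python's resolve falls through to None only when s occurs nowhere in combined, which
-- never happens for the s it is called with; the default [] here is never taken.
def pvResolve (combined : List (List (String × String))) (s : String) : List (String × String) :=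
  (combined.reverse.find? (fun p => pvNorm p == s)).getD []

def merge_products_alt (existing : List (List (String × String))) (new : List (List (String × String))) : List (List (String × String)) :=
  let combined := existing ++ new
  -- out = [resolve(norm(p)) for p in existing if norm(p)]
  let out1 := existing.filterMap
    (fun p => if pvNorm p = "" then none else some (pvResolve combined (pvNorm p)))
  -- seen = {norm(p) for p in existing if norm(p)}
  let seen0 := PySem.Set.ofList
    (existing.filterMap (fun p => if pvNorm p = "" then none else some (pvNorm p)))
  -- for p in new: emit first-seen new-only slugs
  let st := new.foldl
    (fun (st : List (List (String × String)) × PySem.Set String) p =>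
      let s := pvNorm p
      if s ≠ "" ∧ s ∉ st.2
      then (st.1 ++ [pvResolve combined s], st.2.add s)
      else st)
    (out1, seen0)
  st.1

-- ===== PRECONDITION & SPEC =====
def Spec_merge_products (existing : List (List (String × String))) (new : List (List (String × String))) (out : List (List (String × String))) : Prop := out = merge_products_alt existing new
instance (existing : List (List (String × String))) (new : List (List (String × String))) (out : List (List (String × String))) : Decidable (Spec_merge_products existing new out) := by unfold Spec_merge_products; infer_instance

-- ===== CLAIM (what is proved, stated in full; the proofs are below) =====
def Claim_equal_merge_products : Prop := ∀ (existing : List (List (String × String))) (new : List (List (String × String))), Dom_merge_products existing new → Spec_merge_products existing new (merge_products existing new)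

-- ===== LEMMAS AND PROOFS =====

-- A's dict: slug-insertions in order (empties skipped)
def pvDict (d : PySem.Dict String (List (String × String))) : List (List (String × String)) → PySem.Dict String (List (String × String))
  | [] => d
  | p :: t => if pvNorm p = "" then pvDict d t else pvDict (d.insert (pvNorm p) p) t

-- the nonempty normalised slugs of a list, in order, with repeats
def pvSlugs : List (List (String × String)) → List String
  | [] => []
  | p :: t => if pvNorm p = "" then pvSlugs t else pvNorm p :: pvSlugs t

-- slugs contributed by the new list given the slugs already seen
def pvNewOrder : List (List (String × String)) → List String → List String
  | [], _ => []
  | p :: t, seen =>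
    if pvNorm p = "" then pvNewOrder t seen
    else if pvNorm p ∈ seen then pvNewOrder t seen
    else pvNorm p :: pvNewOrder t (seen ++ [pvNorm p])

lemma pvA_loop1 (ps : List (List (String × String))) :
    ∀ (d : PySem.Dict String (List (String × String))) (o : List String),
    ps.foldl (fun (st : PySem.Dict String (List (String × String)) × List String) p =>
      let s := pvNorm p
      if s = "" then st else (st.1.insert s p, st.2 ++ [s])) (d, o)
    = (pvDict d ps, o ++ pvSlugs ps) := by
  induction ps with
  | nil => intro d o; simp [pvDict, pvSlugs]
  | cons p t ih =>
    intro d o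
    simp only [List.foldl_cons]
    by_cases h : pvNorm p = ""
    · rw [if_pos h, ih, pvDict, pvSlugs, if_pos h, if_pos h]
    · rw [if_neg h, ih, pvDict, pvSlugs, if_neg h, if_neg h, List.append_assoc]
      rfl

lemma pvA_loop2 (ps : List (List (String × String))) :
    ∀ (d : PySem.Dict String (List (String × String))) (o : List String),
    ps.foldl (fun (st : PySem.Dict String (List (String × String)) × List String) p =>
      let s := pvNorm p
      if s = "" then st
      else (st.1.insert s p, if s ∈ st.2 then st.2 else st.2 ++ [s])) (d, o)
    = (pvDict d ps, o ++ pvNewOrder ps o) := by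
  induction ps with
  | nil => intro d o; simp [pvDict, pvNewOrder]
  | cons p t ih =>
    intro d o
    simp only [List.foldl_cons]
    by_cases h : pvNorm p = ""
    · rw [if_pos h, ih, pvDict, pvNewOrder, if_pos h, if_pos h]
    · rw [if_neg h]
      by_cases hm : pvNorm p ∈ o
      · rw [if_pos hm, ih, pvDict, pvNewOrder, if_neg h, if_neg h, if_pos hm]
      · rw [if_neg hm, ih, pvDict, pvNewOrder, if_neg h, if_neg h, if_neg hm, List.append_assoc]
        rfl

-- A's dict looked up at a nonempty slug = reverse-order search (B's resolve)
lemma pvDict_get (ps : List (List (String × String))) :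
    ∀ (d : PySem.Dict String (List (String × String))) (s : String), s ≠ "" →
    (pvDict d ps).get? s = (ps.reverse.find? (fun p => pvNorm p == s)).or (d.get? s) := by
  induction ps with
  | nil => intro d s _; simp [pvDict]
  | cons p t ih =>
    intro d s hs
    rw [List.reverse_cons, List.find?_append]
    by_cases h : pvNorm p = ""
    · have hb : (pvNorm p == s) = false := by
        rw [h]; exact beq_eq_false_iff_ne.mpr (Ne.symm hs)
      have hfp : List.find? (fun p => pvNorm p == s) [p] = none := by
        simp only [List.find?, hb]
      rw [pvDict, if_pos h, ih d s hs, hfp]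
      cases List.find? (fun p => pvNorm p == s) t.reverse <;> simp [Option.or]
    · rw [pvDict, if_neg h, ih _ s hs]
      by_cases he : s = pvNorm p
      · have hfp : List.find? (fun p => pvNorm p == s) [p] = some p := by
          simp [List.find?, he]
        have hg : (d.insert (pvNorm p) p).get? s = some p := by
          rw [he]; simp [PySem.Dict.get?_insert_self]
        rw [hfp, hg]
        cases List.find? (fun p => pvNorm p == s) t.reverse <;> simp [Option.or]
      · have hb : (pvNorm p == s) = false := beq_eq_false_iff_ne.mpr (fun hx => he hx.symm)
        have hfp : List.find? (fun p => pvNorm p == s) [p] = none := by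
          simp only [List.find?, hb]
        rw [hfp, PySem.Dict.get?_insert_of_ne _ _ he]
        cases List.find? (fun p => pvNorm p == s) t.reverse <;> simp [Option.or]

lemma pvDict_append (xs ys : List (List (String × String))) :
    ∀ d, pvDict d (xs ++ ys) = pvDict (pvDict d xs) ys := by
  induction xs with
  | nil => intro d; simp [pvDict]
  | cons p t ih =>
    intro d
    by_cases h : pvNorm p = "" <;> simp [pvDict, h, ih]

-- filterMap over a product list with the slug test = map over its slugs
lemma pvFilterMap_map {α : Type} (g : String → α) (ps : List (List (String × String))) :
    ps.filterMap (fun p => if pvNorm p = "" then none else some (g (pvNorm p)))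
    = (pvSlugs ps).map g := by
  induction ps with
  | nil => simp [pvSlugs]
  | cons p t ih =>
    by_cases h : pvNorm p = ""
    · rw [List.filterMap_cons]
      simp only [if_pos h]
      rw [ih, pvSlugs, if_pos h]
    · rw [List.filterMap_cons]
      simp only [if_neg h]
      rw [ih, pvSlugs, if_neg h, List.map_cons]

lemma pvDict_mono (ps : List (List (String × String))) :
    ∀ (d : PySem.Dict String (List (String × String))) (s : String),
    (d.get? s).isSome → ((pvDict d ps).get? s).isSome := by
  induction ps with
  | nil => intro d s h; simpa [pvDict] using h
  | cons p t ih =>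
    intro d s h
    by_cases hp : pvNorm p = ""
    · rw [pvDict, if_pos hp]; exact ih d s h
    · rw [pvDict, if_neg hp]
      apply ih
      by_cases he : s = pvNorm p
      · subst he; simp [PySem.Dict.get?_insert_self]
      · rwa [PySem.Dict.get?_insert_of_ne _ _ he]

lemma pvDict_mem (ps : List (List (String × String))) :
    ∀ (d : PySem.Dict String (List (String × String))) (s : String),
    s ∈ pvSlugs ps → ((pvDict d ps).get? s).isSome := by
  induction ps with
  | nil => intro d s h; simp [pvSlugs] at h
  | cons p t ih =>
    intro d s h
    by_cases hp : pvNorm p = ""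
    · rw [pvSlugs, if_pos hp] at h
      rw [pvDict, if_pos hp]
      exact ih d s h
    · rw [pvSlugs, if_neg hp, List.mem_cons] at h
      rw [pvDict, if_neg hp]
      rcases h with h | h
      · subst h
        exact pvDict_mono t _ _ (by simp [PySem.Dict.get?_insert_self])
      · exact ih _ s h

lemma pvSlugs_ne (ps : List (List (String × String))) :
    ∀ s, s ∈ pvSlugs ps → s ≠ "" := by
  induction ps with
  | nil => intro s h; simp [pvSlugs] at h
  | cons p t ih =>
    intro s h
    by_cases hp : pvNorm p = ""
    · rw [pvSlugs, if_pos hp] at h; exact ih s h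
    · rw [pvSlugs, if_neg hp, List.mem_cons] at h
      rcases h with h | h
      · exact h ▸ hp
      · exact ih s h

lemma pvNewOrder_subset (ps : List (List (String × String))) :
    ∀ (seen : List String) (s : String), s ∈ pvNewOrder ps seen → s ∈ pvSlugs ps := by
  induction ps with
  | nil => intro seen s h; simp [pvNewOrder] at h
  | cons p t ih =>
    intro seen s h
    by_cases hp : pvNorm p = ""
    · rw [pvNewOrder, if_pos hp] at h
      rw [pvSlugs, if_pos hp]
      exact ih seen s h
    · rw [pvSlugs, if_neg hp, List.mem_cons]
      by_cases hm : pvNorm p ∈ seen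
      · rw [pvNewOrder, if_neg hp, if_pos hm] at h
        exact Or.inr (ih seen s h)
      · rw [pvNewOrder, if_neg hp, if_neg hm, List.mem_cons] at h
        rcases h with h | h
        · exact Or.inl h
        · exact Or.inr (ih _ s h)

-- B's new-loop fold = mapping resolve over pvNewOrder
lemma pvB_loop2 (C : List (List (String × String))) (ps : List (List (String × String))) :
    ∀ (seen : List String) (em : PySem.Set String) (out : List (List (String × String))),
    (∀ x, x ∈ seen ↔ x ∈ em) →
    (ps.foldl (fun (st : List (List (String × String)) × PySem.Set String) p =>
      let s := pvNorm p
      if s ≠ "" ∧ s ∉ st.2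
      then (st.1 ++ [pvResolve C s], st.2.add s)
      else st) (out, em)).1
    = out ++ (pvNewOrder ps seen).map (pvResolve C) := by
  induction ps with
  | nil => intro seen em out _; simp [pvNewOrder]
  | cons p t ih =>
    intro seen em out hseen
    simp only [List.foldl_cons]
    by_cases h : pvNorm p = ""
    · rw [if_neg (fun hc => hc.1 h), ih seen em out hseen, pvNewOrder, if_pos h]
    · by_cases hm : pvNorm p ∈ seen
      · rw [if_neg (fun hc => hc.2 ((hseen _).mp hm)), ih seen em out hseen,
            pvNewOrder, if_neg h, if_pos hm]
      · rw [if_pos ⟨h, fun hx => hm ((hseen _).mpr hx)⟩,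
            ih (seen ++ [pvNorm p]) (PySem.Set.add em (pvNorm p)) _ (by
              intro x
              rw [List.mem_append, List.mem_singleton, hseen x, PySem.Set.mem_add]),
            pvNewOrder, if_neg h, if_neg hm, List.map_cons, List.append_assoc]
        rfl

-- filterMap by get? = map resolve, on slugs the dict certainly holds
lemma pvFilterMap_get (C : List (List (String × String))) (l : List String)
    (h : ∀ s ∈ l, s ≠ "" ∧ ((pvDict PySem.Dict.empty C).get? s).isSome) :
    l.filterMap (fun s => (pvDict PySem.Dict.empty C).get? s) = l.map (pvResolve C) := by
  induction l with
  | nil => simp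
  | cons s t ih =>
    obtain ⟨hs, hsome⟩ := h s (by simp)
    have hg : (pvDict PySem.Dict.empty C).get? s
        = (C.reverse.find? (fun p => pvNorm p == s)) := by
      rw [pvDict_get C PySem.Dict.empty s hs, PySem.Dict.get?_empty]
      cases C.reverse.find? (fun p => pvNorm p == s) <;> simp [Option.or]
    rw [hg] at hsome
    obtain ⟨v, hv⟩ := Option.isSome_iff_exists.mp hsome
    rw [List.filterMap_cons, hg, hv, List.map_cons,
        ih (fun x hx => h x (by simp [hx]))]
    simp [pvResolve, hv]

-- ===== VERDICT (by name: the statement is the Claim_ definition above) =====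
theorem merge_products_spec : Claim_equal_merge_products := by
  intro existing new _
  unfold Spec_merge_products merge_products merge_products_alt
  dsimp only
  rw [pvA_loop1, pvA_loop2]
  dsimp only
  rw [List.nil_append,
    pvFilterMap_map (pvResolve (existing ++ new)) existing,
    (by simpa using pvFilterMap_map id existing :
      existing.filterMap (fun p => if pvNorm p = "" then none else some (pvNorm p))
        = pvSlugs existing),
    pvB_loop2 (existing ++ new) new (pvSlugs existing) _ _ (by
      intro x; rw [PySem.Set.mem_ofList]),
    List.filterMap_append, ← pvDict_append,
    pvFilterMap_get _ _ (fun s hs =>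
      ⟨pvSlugs_ne existing s hs,
       by rw [pvDict_append]; exact pvDict_mono new _ s (pvDict_mem existing _ s hs)⟩),
    pvFilterMap_get _ _ (fun s hs =>
      ⟨pvSlugs_ne new s (pvNewOrder_subset new _ s hs),
       by rw [pvDict_append]; exact pvDict_mem new _ s (pvNewOrder_subset new _ s hs)⟩)]
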